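-- pv_equiv track=rewrite | github.com/meoxumi1994/auto-tagging-skill-2 | singleNN_v2.py | removedLatex
-- ===== SOURCE A (Python) =====
-- def removedLatex(line):
--     ans = ""
--     outside = True
--     for ch in line:
--         if ch == '$' and outside:
--             outside = False
--         elif ch == '$' and not outside:
--             outside = True
--         elif outside:
--             ans += ch
--     return ans
-- ===== SOURCE B (Python) =====
-- def removedLatex(line):
--     return ''.join(line.split('$')[::2])
-- ===== Notes on version B (the rewrite author's own statement) =====
-- stated objective: faster
-- what changed: Replaces the character-by-character flag-toggling scan with quadratic string concatenation by a single split at the delimiter followed by joining the even-indexed (outside-delimiter) segments.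
import Mathlib
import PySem

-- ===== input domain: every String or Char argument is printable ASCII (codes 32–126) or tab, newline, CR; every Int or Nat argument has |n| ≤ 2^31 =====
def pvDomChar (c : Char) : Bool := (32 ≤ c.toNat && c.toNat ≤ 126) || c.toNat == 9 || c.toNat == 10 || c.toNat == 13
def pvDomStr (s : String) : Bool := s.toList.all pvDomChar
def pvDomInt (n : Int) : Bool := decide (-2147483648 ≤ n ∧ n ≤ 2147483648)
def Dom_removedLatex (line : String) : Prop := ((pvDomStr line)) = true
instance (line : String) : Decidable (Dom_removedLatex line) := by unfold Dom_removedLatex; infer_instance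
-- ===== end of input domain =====

-- B replaces A's flag-toggling character scan by split-on-'$' and joining the even-indexed parts (simpler).

-- ===== PORT A =====
-- literal transliteration of A: accumulate ans (as List Char), toggle `outside` on '$'
def removedLatex (line : String) : String :=
  String.ofList
    (line.toList.foldl
      (fun (st : List Char × Bool) ch =>
        if ch = '$' ∧ st.2 = true then (st.1, false)
        else if ch = '$' ∧ ¬ st.2 = true then (st.1, true)
        else if st.2 = true then (st.1 ++ [ch], st.2)
        else st)
      ([], true)).1

-- ===== PORT B =====
-- literal transliteration of B: ''.join(line.split('$')[::2])
def removedLatex_alt (line : String) : String :=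
  -- line.split('$') never raises (sep nonempty) and [::2] never raises (step ≠ 0), hence the getD
  PySem.Str.join ""
    ((PySem.List.slice? ((PySem.Str.split? line "$").getD []) none none 2).getD [])

-- ===== PRECONDITION & SPEC =====
def Spec_removedLatex (line : String) (out : String) : Prop := out = removedLatex_alt line
instance (line : String) (out : String) : Decidable (Spec_removedLatex line out) := by unfold Spec_removedLatex; infer_instance

-- ===== CLAIM (what is proved, stated in full; the proofs are below) =====
def Claim_equal_removedLatex : Prop := ∀ (line : String), Dom_removedLatex line → Spec_removedLatex line (removedLatex line)

-- ===== LEMMAS AND PROOFS =====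

-- what A's scan keeps, as a simple recursion with the `outside` flag
def pvKeep : Bool → List Char → List Char
  | _, [] => []
  | b, c :: cs => if c = '$' then pvKeep (!b) cs else if b then c :: pvKeep b cs else pvKeep b cs

-- the chunks line.split('$') produces, as a simple recursion
def pvChunks : List Char → List (List Char)
  | [] => [[]]
  | c :: cs =>
    if c = '$' then [] :: pvChunks cs
    else
      match pvChunks cs with
      | [] => [[c]]
      | h :: t => (c :: h) :: t

def pvEvens {α : Type} : List α → List α
  | [] => []
  | [x] => [x]
  | x :: _ :: t => x :: pvEvens t

def pvOdds {α : Type} : List α → List α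
  | [] => []
  | _ :: t => pvEvens t

theorem pvChunks_ne_nil (cs : List Char) : pvChunks cs ≠ [] := by
  cases cs with
  | nil => simp [pvChunks]
  | cons c cs =>
    simp only [pvChunks]
    split
    · simp
    · split <;> simp

theorem pvFoldA (cs : List Char) : ∀ (acc : List Char) (b : Bool),
    (cs.foldl
      (fun (st : List Char × Bool) ch =>
        if ch = '$' ∧ st.2 = true then (st.1, false)
        else if ch = '$' ∧ ¬ st.2 = true then (st.1, true)
        else if st.2 = true then (st.1 ++ [ch], st.2)
        else st)
      (acc, b)).1 = acc ++ pvKeep b cs := by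
  induction cs with
  | nil => intro acc b; simp [pvKeep]
  | cons c cs ih =>
    intro acc b
    rw [List.foldl_cons]
    by_cases hc : c = '$'
    · cases b
      · rw [if_neg (by simp), if_pos ⟨hc, by simp⟩, ih, pvKeep]
        simp [hc]
      · rw [if_pos ⟨hc, rfl⟩, ih, pvKeep]
        simp [hc]
    · cases b
      · rw [if_neg (by simp [hc]), if_neg (by simp [hc]), if_neg (by simp), ih, pvKeep]
        simp [hc]
      · rw [if_neg (by simp [hc]), if_neg (by simp [hc]), if_pos rfl, ih, pvKeep]
        simp [hc]

theorem pvGo (fuel : Nat) : ∀ (l cur : List Char) (acc : List (List Char)), l.length < fuel →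
    ∀ h t, pvChunks l = h :: t →
    PySem.Chars.splitOn.go ['$'] fuel l cur acc = acc.reverse ++ (cur.reverse ++ h) :: t := by
  induction fuel with
  | zero => intro l cur acc hl; omega
  | succ fuel ih =>
    intro l cur acc hl h t hch
    cases l with
    | nil =>
      simp [pvChunks] at hch
      simp [PySem.Chars.splitOn.go, hch.1, ← hch.2]
    | cons c rest =>
      obtain ⟨h2, t2, hD⟩ : ∃ h2 t2, pvChunks rest = h2 :: t2 := by
        cases hx : pvChunks rest with
        | nil => exact absurd hx (pvChunks_ne_nil rest)
        | cons a b => exact ⟨a, b, rfl⟩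
      by_cases hc : c = '$'
      · subst hc
        have hch2 : ([] : List Char) :: h2 :: t2 = h :: t := by
          rw [← hD]; simpa [pvChunks] using hch
        obtain ⟨rfl, rfl⟩ := List.cons.inj hch2
        simp only [PySem.Chars.splitOn.go, List.isPrefixOf, beq_self_eq_true, Bool.true_and, if_pos]
        have hdrop : List.drop (['$'] : List Char).length ('$' :: rest) = rest := rfl
        rw [hdrop, ih rest [] (cur.reverse :: acc) (by simpa using Nat.lt_of_succ_lt_succ hl) h2 t2 hD]
        simp
      · have hch2 : (c :: h2) :: t2 = h :: t := by
          rw [← hch]; simp only [pvChunks, if_neg hc, hD]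
        obtain ⟨rfl, rfl⟩ := List.cons.inj hch2
        have hpre : ((['$'] : List Char).isPrefixOf (c :: rest)) = false := by
          simp [List.isPrefixOf]
          exact fun hx => absurd hx.symm hc
        simp only [PySem.Chars.splitOn.go, hpre, Bool.false_eq_true, if_false]
        rw [ih rest (c :: cur) acc (by simpa using Nat.lt_of_succ_lt_succ hl) h2 t2 hD]
        simp

theorem pvSplitOn (cs : List Char) : PySem.Chars.splitOn cs ['$'] = pvChunks cs := by
  obtain ⟨h, t, hD⟩ : ∃ h t, pvChunks cs = h :: t := by
    cases hx : pvChunks cs with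
    | nil => exact absurd hx (pvChunks_ne_nil cs)
    | cons a b => exact ⟨a, b, rfl⟩
  unfold PySem.Chars.splitOn
  rw [pvGo (cs.length + 1) cs [] [] (by omega) h t hD, hD]
  simp

theorem pvEvens_cons {α : Type} (x : α) (t : List α) : pvEvens (x :: t) = x :: pvOdds t := by
  cases t <;> simp [pvEvens, pvOdds]

theorem pvFilterMapKey {α : Type} (xs : List α) :
    List.filterMap (fun k : Nat => xs[2 * k]?) (List.range ((xs.length + 1) / 2)) = pvEvens xs := by
  induction xs using pvEvens.induct with
  | case1 => simp [pvEvens]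
  | case2 x => simp [pvEvens, List.range_succ]
  | case3 x y t ih =>
    have hcnt : ((x :: y :: t).length + 1) / 2 = (t.length + 1) / 2 + 1 := by
      simp only [List.length_cons]; omega
    rw [hcnt, List.range_succ_eq_map]
    simp only [List.filterMap_cons, List.filterMap_map, Function.comp_def]
    have e0 : (x :: y :: t)[2 * 0]? = some x := by simp
    rw [e0]
    have ef : (fun k : Nat => (x :: y :: t)[2 * (k + 1)]?) = fun k : Nat => t[2 * k]? := by
      funext k
      have h : 2 * (k + 1) = 2 * k + 1 + 1 := by omega
      simp [h]
    rw [ef, ih, pvEvens]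

theorem pvFilterMapEvens {α : Type} (xs : List α) :
    List.filterMap (fun k : Nat => xs[(0 + 2 * (k : Int)).toNat]?)
      (List.range ((((xs.length : Int) - 0 + 2 - 1) / 2).toNat)) = pvEvens xs := by
  have h2 : ((((xs.length : Int)) - 0 + 2 - 1) / 2).toNat = (xs.length + 1) / 2 := by omega
  have hf : (fun k : Nat => xs[(0 + 2 * (k : Int)).toNat]?) = (fun k : Nat => xs[2 * k]?) := by
    funext k
    have : (0 + 2 * (k : Int)).toNat = 2 * k := by omega
    rw [this]
  rw [h2, hf, pvFilterMapKey]

theorem pvSlice2 {α : Type} (xs : List α) : PySem.List.slice? xs none none 2 = some (pvEvens xs) := by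
  unfold PySem.List.slice?
  simp only [if_neg (by norm_num : (2 : Int) ≠ 0)]
  unfold PySem.List.sliceIndices
  simp only [if_neg (by norm_num : ¬ (2 : Int) < 0)]
  rw [if_pos (by norm_num : (0 : Int) < 2)]
  by_cases h : (0 : Int) < xs.length
  · rw [if_pos h]
    exact congrArg some (pvFilterMapEvens xs)
  · have hx : xs = [] := by
      cases xs with
      | nil => rfl
      | cons a b => simp at h
    subst hx
    simp [pvEvens]

theorem pvEvens_map {α β : Type} (f : α → β) (l : List α) :
    pvEvens (l.map f) = (pvEvens l).map f := by
  induction l using pvEvens.induct with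
  | case1 => simp [pvEvens]
  | case2 x => simp [pvEvens]
  | case3 x y t ih => simp [pvEvens, ih]

theorem pvIntercalateNil {α : Type} (xs : List (List α)) :
    List.intercalate ([] : List α) xs = xs.flatten := by
  induction xs with
  | nil => rfl
  | cons x xs ih =>
    cases xs with
    | nil => simp [List.intercalate]
    | cons y t =>
      simp only [List.intercalate, List.intersperse] at ih ⊢
      simp_all

theorem pvFlattenEvensChunks (cs : List Char) :
    (pvEvens (pvChunks cs)).flatten = pvKeep true cs ∧
    (pvOdds (pvChunks cs)).flatten = pvKeep false cs := by
  induction cs with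
  | nil => simp [pvChunks, pvEvens, pvOdds, pvKeep]
  | cons c cs ih =>
    obtain ⟨h, t, hD⟩ : ∃ h t, pvChunks cs = h :: t := by
      cases hx : pvChunks cs with
      | nil => exact absurd hx (pvChunks_ne_nil cs)
      | cons a b => exact ⟨a, b, rfl⟩
    obtain ⟨ih1, ih2⟩ := ih
    by_cases hc : c = '$'
    · subst hc
      have hck : pvChunks ('$' :: cs) = [] :: pvChunks cs := by simp [pvChunks]
      rw [hck]
      constructor
      · rw [pvEvens_cons]
        simpa [pvKeep] using ih2
      · simp only [pvOdds]
        simpa [pvKeep] using ih1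
    · have hck : pvChunks (c :: cs) = (c :: h) :: t := by simp only [pvChunks, if_neg hc, hD]
      rw [hck]
      rw [hD] at ih1 ih2
      constructor
      · rw [pvEvens_cons]
        rw [pvEvens_cons] at ih1
        simp only [List.flatten_cons] at ih1 ⊢
        simp [pvKeep, hc, ← ih1]
      · simp only [pvOdds] at ih2 ⊢
        simp only [pvKeep, if_neg hc, if_neg (Bool.false_ne_true)]
        cases t with
        | nil => simpa [pvEvens] using ih2
        | cons u v => simpa [pvEvens] using ih2

theorem pvAltEq (line : String) :
    removedLatex_alt line = String.ofList (pvKeep true line.toList) := by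
  unfold removedLatex_alt
  rw [PySem.Str.split?]
  rw [PySem.Chars.split?]
  simp only [if_neg (by simp : ¬ (("$".toList).isEmpty = true))]
  have hsep : "$".toList = ['$'] := by decide
  rw [hsep, pvSplitOn]
  simp only [Option.map_some, Option.getD_some]
  rw [pvSlice2]
  simp only [Option.getD_some]
  rw [pvEvens_map]
  unfold PySem.Str.join
  rw [PySem.Chars.join]
  have : (List.map String.toList (List.map String.ofList (pvEvens (pvChunks line.toList)))) = pvEvens (pvChunks line.toList) := by
    rw [List.map_map]
    simp [Function.comp_def]
  rw [this]
  have hnil : "".toList = ([] : List Char) := by decide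
  rw [hnil, pvIntercalateNil]
  exact congrArg String.ofList (pvFlattenEvensChunks line.toList).1

-- ===== VERDICT (by name: the statement is the Claim_ definition above) =====
theorem removedLatex_spec : Claim_equal_removedLatex := by
  intro line _
  unfold Spec_removedLatex removedLatex
  rw [pvAltEq, pvFoldA line.toList [] true]
  simp
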